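-- pv_equiv track=rewrite | github.com/Ing-Josef-Klotzner/python | 2017/hackerrank/arrayPairs.py | solve_w
-- ===== SOURCE A (Python) =====
-- from collections import deque   #, defaultdict
-- from copy import deepcopy
--
-- def solve_w (a):
--     res = 0   # simple, faster with windowing max
--     q = q_init = deque ([0])
--     for j in range (1, len (a)):
--         q = deepcopy (q_init)
--         while q and a [j] >= a [q [-1]]: q.pop ()
--         q.append (j)
--         q_init = deepcopy (q)
--         for i in range (j):
--             mx = a [q [0]]
--             while q and q [0] <= i: q.popleft ()
--             if (a [i] * a [j] <= mx): res += 1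
--     return res
-- ===== SOURCE B (Python) =====
-- def solve_w(a):
--     # Count pairs (i, j), i < j, with a[i]*a[j] <= max(a[i..j]):
--     # fix i and keep a running maximum while j grows; no deque, no deepcopy.
--     res = 0
--     n = len(a)
--     for i in range(n):
--         mx = a[i]
--         for j in range(i + 1, n):
--             mx = max(mx, a[j])
--             if a[i] * a[j] <= mx:
--                 res += 1
--     return res
-- ===== Notes on version B (the rewrite author's own statement) =====
-- stated objective: simpler
-- what changed: Replaced the monotonic deque that is deep-copied and re-filtered for every j by a plain running maximum over a[i..j] with i as the outer loop, removing the deque, both deepcopies and the popleft pass.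
import Mathlib
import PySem

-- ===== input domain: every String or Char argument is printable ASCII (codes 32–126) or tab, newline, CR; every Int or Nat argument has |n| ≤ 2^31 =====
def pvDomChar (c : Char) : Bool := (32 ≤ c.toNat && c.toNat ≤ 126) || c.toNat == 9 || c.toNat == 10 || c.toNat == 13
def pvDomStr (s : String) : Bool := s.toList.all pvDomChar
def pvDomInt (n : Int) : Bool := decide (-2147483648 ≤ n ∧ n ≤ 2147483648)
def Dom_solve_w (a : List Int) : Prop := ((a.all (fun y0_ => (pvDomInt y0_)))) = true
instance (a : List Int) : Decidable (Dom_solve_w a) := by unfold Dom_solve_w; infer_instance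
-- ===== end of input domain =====

-- B replaces A's per-j deep-copied monotonic deque by a plain running maximum with i as the
-- outer loop; objective: simpler (same O(n^2) pair count, no deque/deepcopy machinery).
-- All list indices either program reads are in range, so `List.getD` is exact here.

-- ===== PORT A =====
-- `while q and a[j] >= a[q[-1]]: q.pop()` — remove elements from the BACK while the test holds
def pvDropBackWhile (p : Nat → Bool) : List Nat → List Nat
  | [] => []
  | x :: xs =>
    let r := pvDropBackWhile p xs
    if r.isEmpty && p x then [] else x :: r

def solve_w (a : List Int) : Int :=
  -- res = 0; q = q_init = deque([0]); for j in range(1, len(a)): … (deepcopy = copy of an immutable value)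
  (((List.range' 1 (a.length - 1)).foldl
    (fun (st : Int × List Nat) j =>
      let q1 := pvDropBackWhile (fun k => decide (a.getD k 0 ≤ a.getD j 0)) st.2
      let q2 := q1 ++ [j]
      let inner := (List.range j).foldl
        (fun (p : Int × List Nat) i =>
          let mx := a.getD (p.2.headD 0) 0
          let q' := p.2.dropWhile (fun k => k ≤ i)
          ((if a.getD i 0 * a.getD j 0 ≤ mx then p.1 + 1 else p.1), q'))
        (st.1, q2)
      (inner.1, q2))
    (0, [0]))).1

-- ===== PORT B =====
def solve_w_alt (a : List Int) : Int :=
  -- res = 0; for i in range(n): mx = a[i]; for j in range(i+1, n): mx = max(mx, a[j]); …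
  (List.range a.length).foldl
    (fun res i =>
      ((List.range' (i + 1) (a.length - (i + 1))).foldl
        (fun (p : Int × Int) j =>
          let mx := max p.1 (a.getD j 0)
          (mx, if a.getD i 0 * a.getD j 0 ≤ mx then p.2 + 1 else p.2))
        (a.getD i 0, res)).2)
    0

-- ===== PRECONDITION & SPEC =====
def Spec_solve_w (a : List Int) (out : Int) : Prop := out = solve_w_alt a
instance (a : List Int) (out : Int) : Decidable (Spec_solve_w a out) := by unfold Spec_solve_w; infer_instance

-- ===== CLAIM (what is proved, stated in full; the proofs are below) =====
def Claim_equal_solve_w : Prop := ∀ (a : List Int), Dom_solve_w a → Spec_solve_w a (solve_w a)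

-- ===== LEMMAS AND PROOFS =====

def wmax (a : List Int) (i j : Nat) : Int :=
  (List.range' (i + 1) (j - i)).foldl (fun m k => max m (a.getD k 0)) (a.getD i 0)

def gpair (a : List Int) (i j : Nat) : Int :=
  if a.getD i 0 * a.getD j 0 ≤ wmax a i j then 1 else 0

def Pb (a : List Int) (j k : Nat) : Bool :=
  (List.range' (k + 1) (j - k)).all (fun m => a.getD m 0 < a.getD k 0)

def qspec (a : List Int) (j : Nat) : List Nat := (List.range (j + 1)).filter (Pb a j)

-- fold-max toolbox
lemma foldl_max_max (v : Nat → Int) (l : List Nat) : ∀ x y : Int,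
    l.foldl (fun m k => max m (v k)) (max x y) = max x (l.foldl (fun m k => max m (v k)) y) := by
  induction l with
  | nil => intro x y; rfl
  | cons z t ih =>
    intro x y
    simp only [List.foldl_cons, max_assoc]
    exact ih x (max y (v z))

lemma foldl_max_eq_self (v : Nat → Int) (l : List Nat) : ∀ x : Int, (∀ k ∈ l, v k ≤ x) →
    l.foldl (fun m k => max m (v k)) x = x := by
  induction l with
  | nil => intro x _; rfl
  | cons z t ih =>
    intro x h
    simp only [List.foldl_cons]
    rw [max_eq_left (h z (by simp))]
    exact ih x (fun k hk => h k (by simp [hk]))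

lemma le_foldl_max' (v : Nat → Int) (l : List Nat) : ∀ x : Int, x ≤ l.foldl (fun m k => max m (v k)) x := by
  induction l with
  | nil => intro x; exact le_refl x
  | cons z t ih =>
    intro x
    simp only [List.foldl_cons]
    exact le_trans (le_max_left x (v z)) (ih _)

lemma mem_le_foldl_max (v : Nat → Int) (l : List Nat) : ∀ x : Int, ∀ m ∈ l, v m ≤ l.foldl (fun m k => max m (v k)) x := by
  induction l with
  | nil => intro x m hm; simp at hm
  | cons z t ih =>
    intro x m hm
    simp only [List.foldl_cons]
    rcases List.mem_cons.mp hm with h | h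
    · subst h; exact le_trans (le_max_right x (v m)) (le_foldl_max' v t _)
    · exact ih _ m h

-- wmax lemmas
lemma wmax_self (a : List Int) (j : Nat) : wmax a j j = a.getD j 0 := by
  simp [wmax]

lemma wmax_cons (a : List Int) {i j : Nat} (h : i < j) :
    wmax a i j = max (a.getD i 0) (wmax a (i + 1) j) := by
  unfold wmax
  have h1 : j - i = (j - (i + 1)) + 1 := by omega
  rw [h1, List.range'_succ, List.foldl_cons]
  rw [foldl_max_max]

lemma wmax_snoc (a : List Int) {i j : Nat} (h : i ≤ j) :
    wmax a i (j + 1) = max (wmax a i j) (a.getD (j + 1) 0) := by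
  unfold wmax
  have h1 : j + 1 - i = (j - i) + 1 := by omega
  rw [h1, List.range'_1_concat, List.foldl_concat]
  congr 2
  omega

lemma wmax_eq_of_all (a : List Int) {i j : Nat}
    (h : ∀ m, i < m → m ≤ j → a.getD m 0 < a.getD i 0) : wmax a i j = a.getD i 0 := by
  apply foldl_max_eq_self
  intro k hk
  rw [List.mem_range'_1] at hk
  exact le_of_lt (h k (by omega) (by omega))

lemma le_wmax_of_mem (a : List Int) {i j m : Nat} (h1 : i < m) (h2 : m ≤ j) :
    a.getD m 0 ≤ wmax a i j := by
  apply mem_le_foldl_max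
  rw [List.mem_range'_1]
  omega

lemma le_wmax_of_between (a : List Int) {i j m : Nat} (h1 : i ≤ m) (h2 : m ≤ j) :
    a.getD m 0 ≤ wmax a i j := by
  rcases Nat.eq_or_lt_of_le h1 with h | h
  · subst h; exact le_foldl_max' _ _ _
  · exact le_wmax_of_mem a h h2

-- Pb lemmas
lemma Pb_iff (a : List Int) (j k : Nat) :
    Pb a j k = true ↔ ∀ m, k < m → m ≤ j → a.getD m 0 < a.getD k 0 := by
  simp only [Pb, List.all_eq_true, List.mem_range'_1, decide_eq_true_eq]
  constructor
  · intro h m h1 h2; exact h m ⟨by omega, by omega⟩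
  · intro h m ⟨h1, h2⟩; exact h m (by omega) (by omega)

lemma Pb_self (a : List Int) (j : Nat) : Pb a j j = true := by
  simp [Pb]

lemma Pb_succ (a : List Int) {j k : Nat} (hk : k ≤ j) :
    Pb a (j + 1) k = (Pb a j k && decide (a.getD (j + 1) 0 < a.getD k 0)) := by
  rw [Bool.eq_iff_iff, Pb_iff, Bool.and_eq_true, Pb_iff, decide_eq_true_eq]
  constructor
  · intro h
    exact ⟨fun m h1 h2 => h m h1 (by omega), h (j + 1) (by omega) (le_refl _)⟩
  · rintro ⟨h1, h2⟩ m hm1 hm2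
    rcases Nat.lt_or_ge m (j + 1) with h | h
    · exact h1 m hm1 (by omega)
    · have : m = j + 1 := by omega
      subst this; exact h2

-- qspec lemmas
lemma qspec_zero (a : List Int) : qspec a 0 = [0] := by
  simp [qspec, List.range_succ, Pb_self]

lemma mem_qspec (a : List Int) (j k : Nat) : k ∈ qspec a j ↔ k ≤ j ∧ Pb a j k = true := by
  simp only [qspec, List.mem_filter, List.mem_range]
  constructor <;> rintro ⟨h1, h2⟩ <;> exact ⟨by omega, h2⟩

lemma qspec_sorted (a : List Int) (j : Nat) : (qspec a j).Pairwise (· < ·) :=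
  List.Pairwise.filter _ List.pairwise_lt_range

lemma qspec_val_sorted (a : List Int) (j : Nat) :
    (qspec a j).Pairwise (fun x y => a.getD y 0 < a.getD x 0) := by
  apply List.Pairwise.imp_of_mem (l := qspec a j) ?_ (qspec_sorted a j)
  intro x y hx hy hlt
  rw [mem_qspec] at hx hy
  exact (Pb_iff a j x).mp hx.2 y hlt hy.1

-- dropBackWhile on a value-decreasing list is a filter
lemma pvDropBackWhile_all (p : Nat → Bool) (q : List Nat) (h : ∀ k ∈ q, p k = true) :
    pvDropBackWhile p q = [] := by
  induction q with
  | nil => rfl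
  | cons x xs ih =>
    rw [pvDropBackWhile]
    simp only [ih (fun k hk => h k (by simp [hk])), List.isEmpty_nil, h x (by simp), Bool.and_self,
      if_true]

lemma pvDropBackWhile_eq_filter (a : List Int) (t : Int) (q : List Nat)
    (h : q.Pairwise (fun x y => a.getD y 0 < a.getD x 0)) :
    pvDropBackWhile (fun k => decide (a.getD k 0 ≤ t)) q
      = q.filter (fun k => decide (t < a.getD k 0)) := by
  induction q with
  | nil => rfl
  | cons x xs ih =>
    rcases List.pairwise_cons.mp h with ⟨hx, hxs⟩
    by_cases hc : a.getD x 0 ≤ t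
    · rw [pvDropBackWhile_all, eq_comm, List.filter_eq_nil_iff]
      · intro k hk
        rcases List.mem_cons.mp hk with h' | h'
        · subst h'; simpa using hc
        · simp only [decide_eq_true_eq, not_lt]
          exact le_trans (le_of_lt (hx k h')) hc
      · intro k hk
        rcases List.mem_cons.mp hk with h' | h'
        · subst h'; simpa using hc
        · simp only [decide_eq_true_eq]
          exact le_trans (le_of_lt (hx k h')) hc
    · push Not at hc
      rw [pvDropBackWhile]
      simp only [ih hxs]
      have hpx : (decide (a.getD x 0 ≤ t)) = false := by simpa using hc
      rw [hpx, Bool.and_false, if_neg (by simp)]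
      rw [List.filter_cons_of_pos (by simpa using hc)]

-- filters on sorted lists
lemma filter_ge_cons (l : List Nat) (i : Nat) (hs : l.Pairwise (· < ·)) (hi : i ∈ l) :
    l.filter (fun k => decide (i ≤ k)) = i :: l.filter (fun k => decide (i + 1 ≤ k)) := by
  induction l with
  | nil => simp at hi
  | cons x xs ih =>
    rcases List.pairwise_cons.mp hs with ⟨hx, hxs⟩
    rcases Nat.lt_trichotomy x i with h | h | h
    · have hixs : i ∈ xs := by
        rcases List.mem_cons.mp hi with h' | h'
        · omega
        · exact h'
      rw [List.filter_cons_of_neg (by simpa using h), List.filter_cons_of_neg (by simp; omega)]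
      exact ih hxs hixs
    · subst h
      rw [List.filter_cons_of_pos (by simp), List.filter_cons_of_neg (by simp)]
      congr 1
      apply List.filter_congr
      intro y hy
      have := hx y hy
      simp only [decide_eq_decide]
      omega
    · exfalso
      rcases List.mem_cons.mp hi with h' | h'
      · omega
      · exact absurd (hx i h') (by omega)

lemma filter_ge_of_not_mem (l : List Nat) (i : Nat) (hi : i ∉ l) :
    l.filter (fun k => decide (i ≤ k)) = l.filter (fun k => decide (i + 1 ≤ k)) := by
  apply List.filter_congr
  intro y hy
  have : y ≠ i := fun h => hi (h ▸ hy)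
  simp only [decide_eq_decide]
  omega

lemma dropWhile_le_eq_filter (l : List Nat) (i : Nat) (hs : l.Pairwise (· < ·)) :
    l.dropWhile (fun k => decide (k ≤ i)) = l.filter (fun k => decide (i + 1 ≤ k)) := by
  induction l with
  | nil => rfl
  | cons x xs ih =>
    rcases List.pairwise_cons.mp hs with ⟨hx, hxs⟩
    by_cases h : x ≤ i
    · rw [List.dropWhile_cons_of_pos (by simpa using h), List.filter_cons_of_neg (by simp; omega)]
      exact ih hxs
    · push Not at h
      rw [List.dropWhile_cons_of_neg (by simp; omega), List.filter_cons_of_pos (by simp; omega),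
        List.filter_eq_self.mpr]
      intro y hy
      have := hx y hy
      simp only [decide_eq_true_eq]
      omega

-- the deque step: qspec evolves exactly as A's deque does
lemma qspec_step (a : List Int) (j : Nat) :
    qspec a (j + 1)
      = pvDropBackWhile (fun k => decide (a.getD k 0 ≤ a.getD (j + 1) 0)) (qspec a j) ++ [j + 1] := by
  rw [pvDropBackWhile_eq_filter a _ _ (qspec_val_sorted a j)]
  unfold qspec
  rw [List.range_succ (n := j + 1), List.filter_append]
  congr 1
  · rw [List.filter_filter]
    apply List.filter_congr
    intro k hk
    rw [List.mem_range] at hk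
    rw [Pb_succ a (by omega)]
    exact Bool.and_comm _ _
  · simp [Pb_self]

-- MAIN: the head of the deque (restricted to indices ≥ i) carries the window maximum
lemma qspec_head (a : List Int) (j : Nat) : ∀ d i, i + d = j →
    a.getD (((qspec a j).filter (fun k => decide (i ≤ k))).headD 0) 0 = wmax a i j := by
  intro d
  induction d with
  | zero =>
    intro i hi
    have hj : i = j := by omega
    subst hj
    rw [filter_ge_cons _ _ (qspec_sorted a i) ((mem_qspec a i i).mpr ⟨le_refl _, Pb_self a i⟩)]
    simp [wmax_self]
  | succ d ih =>
    intro i hi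
    by_cases hPb : Pb a j i = true
    · rw [filter_ge_cons _ _ (qspec_sorted a j) ((mem_qspec a j i).mpr ⟨by omega, hPb⟩)]
      simp only [List.headD_cons]
      exact (wmax_eq_of_all a ((Pb_iff a j i).mp hPb)).symm
    · have hnm : i ∉ qspec a j := fun h => hPb ((mem_qspec a j i).mp h).2
      rw [filter_ge_of_not_mem _ _ hnm, ih (i + 1) (by omega)]
      rw [Pb_iff] at hPb
      push Not at hPb
      obtain ⟨m, hm1, hm2, hm3⟩ := hPb
      have hle : a.getD i 0 ≤ wmax a (i + 1) j :=
        le_trans hm3 (le_wmax_of_between a (by omega) hm2)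
      rw [wmax_cons a (show i < j by omega), max_eq_right hle]

-- A's inner loop: counts gpair over i' ∈ [i, j) while thinning the deque
lemma innerA (a : List Int) (j : Nat) : ∀ (m i : Nat) (res : Int), i + m = j →
    ((List.range' i m).foldl
      (fun (p : Int × List Nat) i' =>
        ((if a.getD i' 0 * a.getD j 0 ≤ a.getD (p.2.headD 0) 0 then p.1 + 1 else p.1),
          p.2.dropWhile (fun k => decide (k ≤ i'))))
      (res, (qspec a j).filter (fun k => decide (i ≤ k)))).1
    = res + ((List.range' i m).map (fun i' => gpair a i' j)).sum := by
  intro m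
  induction m with
  | zero => intro i res _; simp
  | succ m ih =>
    intro i res hi
    rw [List.range'_succ, List.foldl_cons, List.map_cons, List.sum_cons]
    have hhead := qspec_head a j (m + 1) i hi
    have hq : ((qspec a j).filter (fun k => decide (i ≤ k))).dropWhile (fun k => decide (k ≤ i))
        = (qspec a j).filter (fun k => decide (i + 1 ≤ k)) := by
      rw [dropWhile_le_eq_filter _ i (List.Pairwise.filter _ (qspec_sorted a j)),
        List.filter_filter]
      apply List.filter_congr
      intro k _
      rw [Bool.eq_iff_iff]
      simp only [Bool.and_eq_true, decide_eq_true_eq]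
      omega
    simp only [hhead, hq]
    rw [ih (i + 1) _ (by omega)]
    unfold gpair
    split_ifs <;> ring
-- A's outer loop invariant: state after the prefix [1..t] is (count so far, qspec a t)
lemma outerA (a : List Int) : ∀ t : Nat,
    ((List.range' 1 t).foldl
      (fun (st : Int × List Nat) j =>
        let q1 := pvDropBackWhile (fun k => decide (a.getD k 0 ≤ a.getD j 0)) st.2
        let q2 := q1 ++ [j]
        let inner := (List.range j).foldl
          (fun (p : Int × List Nat) i =>
            let mx := a.getD (p.2.headD 0) 0
            let q' := p.2.dropWhile (fun k => k ≤ i)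
            ((if a.getD i 0 * a.getD j 0 ≤ mx then p.1 + 1 else p.1), q'))
          (st.1, q2)
        (inner.1, q2))
      (0, [0]))
    = (((List.range' 1 t).map
        (fun j => ((List.range j).map (fun i => gpair a i j)).sum)).sum, qspec a t) := by
  intro t
  induction t with
  | zero => simp [qspec_zero]
  | succ t ih =>
    rw [List.range'_1_concat, List.foldl_concat, ih, List.map_append, List.sum_append]
    have h1t : 1 + t = t + 1 := by omega
    rw [h1t]
    simp only []
    rw [← qspec_step a t]
    have hinit : qspec a (t + 1) = (qspec a (t + 1)).filter (fun k => decide (0 ≤ k)) :=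
      (List.filter_eq_self.mpr (by simp)).symm
    refine Prod.ext ?_ rfl
    simp only []
    conv_lhs => rw [hinit]
    rw [List.range_eq_range', innerA a (t + 1) (t + 1) 0 _ (by omega)]
    simp [List.range_eq_range']
-- A's result is the column-wise pair count
lemma solveA_eq (a : List Int) :
    solve_w a
      = ((List.range a.length).map
          (fun j => ((List.range j).map (fun i => gpair a i j)).sum)).sum := by
  unfold solve_w
  rw [outerA a (a.length - 1)]
  cases hn : a.length with
  | zero => simp
  | succ n =>
    simp only [Nat.succ_sub_one]
    rw [List.range_eq_range', List.range'_succ]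
    simp [List.range_eq_range']

-- B's inner loop: running maximum = wmax, count = gpair sum
lemma innerB (a : List Int) (i : Nat) : ∀ (m : Nat) (res : Int),
    ((List.range' (i + 1) m).foldl
      (fun (p : Int × Int) j =>
        let mx := max p.1 (a.getD j 0)
        (mx, if a.getD i 0 * a.getD j 0 ≤ mx then p.2 + 1 else p.2))
      (a.getD i 0, res))
    = (wmax a i (i + m), res + ((List.range' (i + 1) m).map (fun j => gpair a i j)).sum) := by
  intro m
  induction m with
  | zero => intro res; simp [wmax_self]
  | succ m ih =>
    intro res
    rw [List.range'_1_concat, List.foldl_concat, ih]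
    have he : i + 1 + m = i + m + 1 := by omega
    rw [he]
    have hw : wmax a i (i + m + 1) = max (wmax a i (i + m)) (a.getD (i + m + 1) 0) :=
      wmax_snoc a (by omega)
    simp only [List.map_append, List.sum_append, List.map_cons, List.map_nil, List.sum_cons,
      List.sum_nil]
    refine Prod.ext ?_ ?_
    · simp only []
      rw [← hw]
      congr 1
    · simp only []
      rw [← hw]
      unfold gpair
      split_ifs <;> ring

-- B's result is the row-wise pair count
lemma solveB_eq (a : List Int) :
    solve_w_alt a
      = ((List.range a.length).map
          (fun i => ((List.range' (i + 1) (a.length - (i + 1))).map (fun j => gpair a i j)).sum)).sum := by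
  unfold solve_w_alt
  have hf : (fun (res : Int) (i : Nat) =>
      ((List.range' (i + 1) (a.length - (i + 1))).foldl
        (fun (p : Int × Int) j =>
          let mx := max p.1 (a.getD j 0)
          (mx, if a.getD i 0 * a.getD j 0 ≤ mx then p.2 + 1 else p.2))
        (a.getD i 0, res)).2)
      = fun (res : Int) (i : Nat) =>
        res + ((List.range' (i + 1) (a.length - (i + 1))).map (fun j => gpair a i j)).sum := by
    funext res i
    rw [innerB a i (a.length - (i + 1)) res]
  rw [hf, PySem.List.foldl_add, zero_add]

-- triangle sum swap: summing by column equals summing by row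
lemma sum_swap (g : Nat → Nat → Int) : ∀ n : Nat,
    ((List.range n).map (fun j => ((List.range j).map (fun i => g i j)).sum)).sum
      = ((List.range n).map (fun i => ((List.range' (i + 1) (n - (i + 1))).map (fun j => g i j)).sum)).sum := by
  intro n
  induction n with
  | zero => rfl
  | succ n ih =>
    rw [List.range_succ, List.map_append, List.sum_append, List.map_append, List.sum_append, ih]
    have hcongr : (List.range n).map
          (fun i => ((List.range' (i + 1) (n + 1 - (i + 1))).map (fun j => g i j)).sum)
        = (List.range n).map
          (fun i => ((List.range' (i + 1) (n - (i + 1))).map (fun j => g i j)).sum + g i n) := by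
      apply List.map_congr_left
      intro i hi
      rw [List.mem_range] at hi
      have h1 : n + 1 - (i + 1) = (n - (i + 1)) + 1 := by omega
      rw [h1, List.range'_1_concat]
      have h2 : i + 1 + (n - (i + 1)) = n := by omega
      rw [h2, List.map_append, List.sum_append]
      simp
    rw [hcongr, PySem.List.sum_map_add_int]
    simp

-- ===== VERDICT (by name: the statement is the Claim_ definition above) =====
theorem solve_w_spec : Claim_equal_solve_w := by
  intro a _
  show solve_w a = solve_w_alt a
  rw [solveA_eq, solveB_eq]
  exact sum_swap (gpair a) a.length
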